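-- pv_equiv track=rewrite | github.com/pypi-data/pypi-mirror-381 | packages/barcadia/barcadia-3.3.0.tar.gz/barcadia-3.3.0/src/barcadia/generate_barcodes.py | calculate_hamming_bound
-- ===== SOURCE A (Python) =====
-- import math
--
-- def calculate_hamming_bound(length, min_distance):
--     """Calculate theoretical maximum number of sequences for given length and minimum distance"""
--
--     # Hamming bound: M ≤ 4^n / V(n, t) where t = floor((d-1)/2)
--     # V(n, t) is the volume of a Hamming sphere of radius t
--     total_sequences = 4**length
--     t = (min_distance - 1) // 2
--
--     # Calculate volume of Hamming sphere: V(n, t) = sum(C(n,i) * 3^i) for i=0 to t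
--     sphere_volume = 0
--     for i in range(t + 1):
--         # C(n, i) = n! / (i! * (n-i)!)
--         combinations = math.comb(length, i)
--         sphere_volume += combinations * (3**i)  # 3 possible mutations per position
--
--     # Hamming bound
--     max_sequences = total_sequences // sphere_volume
--     return max_sequences
-- ===== SOURCE B (Python) =====
-- def calculate_hamming_bound(length, min_distance):
--     """Calculate theoretical maximum number of sequences for given length and minimum distance"""
--     # Dynamic programming instead of the binomial sum: the Hamming-sphere volume
--     # V(length, t) counts DNA strings differing from a fixed string in at most t
--     # positions, so extend the string one position at a time with the recurrence
--     # V(i, j) = V(i-1, j) + 3 * V(i-1, j-1), keeping one row indexed by j.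
--     t = (min_distance - 1) // 2
--     row = [1] * (t + 1)  # V(0, j) = 1 for all j
--     for _ in range(length):
--         row = [1] + [b + 3 * a for a, b in zip(row, row[1:])]
--     return 4 ** length // row[-1]
-- ===== Notes on version B (the rewrite author's own statement) =====
-- stated objective: alternative
-- what changed: Replaces the binomial-sum formula (math.comb(length,i)*3**i summed over i) by a dynamic program: the sphere volume V(length,t) counts strings within distance t of a fixed string, computed row by row over string positions with V(i,j)=V(i-1,j)+3*V(i-1,j-1); no binomial coefficients or powers appear at all.
import Mathlib
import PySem

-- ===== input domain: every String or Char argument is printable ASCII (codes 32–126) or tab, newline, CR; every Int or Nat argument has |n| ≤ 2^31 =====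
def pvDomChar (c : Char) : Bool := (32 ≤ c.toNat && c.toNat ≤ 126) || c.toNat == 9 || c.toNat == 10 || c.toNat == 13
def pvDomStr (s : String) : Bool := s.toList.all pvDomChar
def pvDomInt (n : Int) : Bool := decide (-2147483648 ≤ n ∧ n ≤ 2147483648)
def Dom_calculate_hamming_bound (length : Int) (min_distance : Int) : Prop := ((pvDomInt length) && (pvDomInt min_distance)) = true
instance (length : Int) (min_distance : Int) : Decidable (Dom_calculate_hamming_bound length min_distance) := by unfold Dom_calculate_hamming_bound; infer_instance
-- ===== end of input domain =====

-- B computes the Hamming-sphere volume by a dynamic program over string positions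
-- (V(i,j) = V(i-1,j) + 3*V(i-1,j-1)) instead of A's binomial sum: an alternative algorithm.

-- ===== PORT A =====
def calculate_hamming_bound (length : Int) (min_distance : Int) : Int :=
  let total_sequences : Int := 4 ^ length.toNat
  let t := PySem.Int.floordiv (min_distance - 1) 2
  let sphere_volume := (PySem.List.pyRange 0 (t + 1) 1).foldl
    (fun sphere_volume i =>
      let combinations : Int := (length.toNat.choose i.toNat : Int)
      sphere_volume + combinations * 3 ^ i.toNat) 0
  PySem.Int.floordiv total_sequences sphere_volume

-- ===== PORT B =====
-- row = [1] + [b + 3*a for a, b in zip(row, row[1:])], iterated length times;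
-- row[-1] via pyGet?; .getD 0 never fires inside Pre_ (the row is nonempty there).
def calculate_hamming_bound_alt (length : Int) (min_distance : Int) : Int :=
  let t := PySem.Int.floordiv (min_distance - 1) 2
  let row0 : List Int := List.replicate (t + 1).toNat 1
  let row := (List.range length.toNat).foldl
    (fun row _ => 1 :: ((row.zip (row.drop 1)).map fun p => p.2 + 3 * p.1)) row0
  PySem.Int.floordiv (4 ^ length.toNat) ((PySem.List.pyGet? row (-1)).getD 0)

-- ===== PRECONDITION & SPEC =====
-- Pre_ excludes exactly the inputs where the Python A raises: length < 0 (math.comb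
-- raises ValueError) and min_distance < 1 (empty sum leaves sphere_volume = 0,
-- ZeroDivisionError).
def Pre_calculate_hamming_bound (length : Int) (min_distance : Int) : Prop :=
  0 ≤ length ∧ 1 ≤ min_distance
instance (length : Int) (min_distance : Int) : Decidable (Pre_calculate_hamming_bound length min_distance) := by unfold Pre_calculate_hamming_bound; infer_instance
def pvWitness_calculate_hamming_bound : Int × Int := (6, 3)

def Spec_calculate_hamming_bound (length : Int) (min_distance : Int) (out : Int) : Prop := out = calculate_hamming_bound_alt length min_distance
instance (length : Int) (min_distance : Int) (out : Int) : Decidable (Spec_calculate_hamming_bound length min_distance out) := by unfold Spec_calculate_hamming_bound; infer_instance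

-- ===== CLAIM (what is proved, stated in full; the proofs are below) =====
def Claim_equal_calculate_hamming_bound : Prop := ∀ (length : Int) (min_distance : Int), Dom_calculate_hamming_bound length min_distance → Pre_calculate_hamming_bound length min_distance → Spec_calculate_hamming_bound length min_distance (calculate_hamming_bound length min_distance)

-- ===== LEMMAS AND PROOFS =====

-- partial sphere volume: V(m, j) = Σ_{k≤j} C(m,k) 3^k
def pvS (m j : Nat) : Int := ∑ k ∈ Finset.range (j + 1), (m.choose k : Int) * 3 ^ k

theorem pvS_zero (j : Nat) : pvS 0 j = 1 := by
  unfold pvS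
  induction j with
  | zero => simp
  | succ j ih => rw [Finset.sum_range_succ, ih]; simp

-- the DP recurrence: extend the string by one position
theorem pvS_succ (m j : Nat) : pvS (m + 1) (j + 1) = pvS m (j + 1) + 3 * pvS m j := by
  unfold pvS
  rw [Finset.sum_range_succ' (f := fun k => ((m + 1).choose k : Int) * 3 ^ k),
      Finset.sum_range_succ' (f := fun k => (m.choose k : Int) * 3 ^ k)]
  rw [Finset.mul_sum]
  simp only [Nat.choose_succ_succ, Nat.cast_add, add_mul, Finset.sum_add_distrib]
  have h : ∑ k ∈ Finset.range (j + 1), (m.choose k : Int) * 3 ^ (k + 1)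
      = ∑ k ∈ Finset.range (j + 1), 3 * ((m.choose k : Int) * 3 ^ k) :=
    Finset.sum_congr rfl (fun k _ => by ring)
  rw [h]
  simp only [Nat.choose_zero_right]
  ring_nf
  simp only [Nat.succ_eq_one_add]

-- one loop iteration of B maps the row of f-values to the row of g-values
theorem pv_step (f g : Nat → Int) (hg0 : g 0 = 1)
    (hg : ∀ j, g (j + 1) = f (j + 1) + 3 * f j) (n : Nat) :
    (1 : Int) :: ((((List.range (n + 1)).map f).zip (((List.range (n + 1)).map f).drop 1)).map
        fun p => p.2 + 3 * p.1)
      = (List.range (n + 1)).map g := by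
  apply List.ext_getElem
  · simp [List.length_zip]
  · intro i h1 h2
    match i with
    | 0 => simpa using hg0.symm
    | j + 1 =>
      simp only [List.length_cons, List.length_map, List.length_zip, List.length_drop,
        List.length_range] at h1
      have hj : j < n := by omega
      simp only [List.getElem_cons_succ, List.getElem_map, List.getElem_zip, List.getElem_drop,
        List.getElem_range]
      rw [hg j]
      ring

-- loop invariant: after m iterations the row holds V(m, ·)
theorem pv_inv (T m : Nat) :
    (List.range m).foldl
      (fun row _ => 1 :: ((row.zip (row.drop 1)).map fun p => p.2 + 3 * p.1))
      ((List.range (T + 1)).map (pvS 0))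
    = (List.range (T + 1)).map (pvS m) := by
  induction m with
  | zero => simp
  | succ m ih =>
    rw [show List.range (m + 1) = List.range m ++ [m] from List.range_succ,
      List.foldl_append, ih, List.foldl_cons, List.foldl_nil]
    exact pv_step (pvS m) (pvS (m + 1)) (by unfold pvS; simp) (fun j => pvS_succ m j) T

theorem pv_replicate (T : Nat) :
    List.replicate (T + 1) (1 : Int) = (List.range (T + 1)).map (pvS 0) := by
  apply List.ext_getElem
  · simp
  · intro i h1 h2; simp [pvS_zero]

-- A's foldl sum equals V(n, T)
theorem pv_foldl_sum (n T : Nat) :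
    (List.range (T + 1)).foldl (fun acc k => acc + (n.choose k : Int) * 3 ^ k) 0 = pvS n T := by
  unfold pvS
  induction T with
  | zero => simp
  | succ T ih =>
    rw [show List.range (T + 1 + 1) = List.range (T + 1) ++ [T + 1] from List.range_succ,
      List.foldl_append, ih, List.foldl_cons, List.foldl_nil, Finset.sum_range_succ (n := T + 1)]

theorem pv_last (T m : Nat) :
    ((List.range (T + 1)).map (pvS m)).getLast? = some (pvS m T) := by
  rw [List.getLast?_eq_getElem?]
  simp

-- ===== VERDICT (by name: the statement is the Claim_ definition above) =====
theorem calculate_hamming_bound_spec : Claim_equal_calculate_hamming_bound := by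
  intro length min_distance _ hpre
  obtain ⟨hlen, hmd⟩ := hpre
  simp only [Spec_calculate_hamming_bound, calculate_hamming_bound, calculate_hamming_bound_alt]
  set t := PySem.Int.floordiv (min_distance - 1) 2 with ht
  have htnn : 0 ≤ t := by
    rw [ht, PySem.Int.floordiv_eq_ediv_of_pos (by omega)]
    exact Int.ediv_nonneg (by omega) (by omega)
  have htT : t + 1 = ((t.toNat + 1 : Nat) : Int) := by omega
  set n := length.toNat with hn
  set T := t.toNat with hT
  congr 1
  -- LHS: A's sphere volume; RHS: B's final row's last element
  · rw [PySem.List.pyRange_one, List.foldl_map]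
    have harg : ((t + 1 - 0).toNat) = T + 1 := by omega
    rw [harg]
    have : (fun (acc : Int) (k : Nat) => acc + (n.choose ((0 : Int) + (k : Int)).toNat : Int) * 3 ^ ((0 : Int) + (k : Int)).toNat)
        = fun acc k => acc + (n.choose k : Int) * 3 ^ k := by
      funext acc k; simp
    rw [this, pv_foldl_sum n T]
    rw [show (t + 1).toNat = T + 1 by omega] at *
    rw [pv_replicate, pv_inv, PySem.List.pyGet?_neg_one, pv_last]
    rfl
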